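-- pv_equiv track=rewrite | github.com/bexcoding/portfolio | password-generator/rpg-v2.py | pass_checker
-- ===== SOURCE A (Python) =====
-- import string
--
-- uppers = string.ascii_uppercase
--
-- lowers = string.ascii_lowercase
--
-- nums = string.digits
--
-- symbs = string.punctuation
--
-- def pass_checker(password, up, low, num, sym):
--     '''
-- string, int, int, int, int -> list of ints
-- given the preliminary password and an accumulator for each group of character
-- type, returns a list that shows how much each category was used
--     '''
--     for item in password:
--         if item in uppers:
--             up += 1
--         elif item in lowers:
--             low += 1
--         elif item in nums:
--            num += 1
--         elif item in symbs:
--             sym += 1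
--     return [up, low, num, sym]
-- ===== SOURCE B (Python) =====
-- import string
--
-- uppers = string.ascii_uppercase
-- lowers = string.ascii_lowercase
-- nums = string.digits
-- symbs = string.punctuation
--
-- def pass_checker(password, up, low, num, sym):
--     freq = {}
--     for c in password:
--         freq[c] = freq.get(c, 0) + 1
--     up += sum(freq.get(c, 0) for c in uppers)
--     low += sum(freq.get(c, 0) for c in lowers)
--     num += sum(freq.get(c, 0) for c in nums)
--     sym += sum(freq.get(c, 0) for c in symbs)
--     return [up, low, num, sym]
-- ===== Notes on version B (the rewrite author's own statement) =====
-- stated objective: alternative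
-- what changed: B builds a character-frequency dictionary in one pass over the password, then computes each category total by summing frequencies over the four constant alphabets, instead of A's per-character if/elif classification against the alphabets.
import Mathlib
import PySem

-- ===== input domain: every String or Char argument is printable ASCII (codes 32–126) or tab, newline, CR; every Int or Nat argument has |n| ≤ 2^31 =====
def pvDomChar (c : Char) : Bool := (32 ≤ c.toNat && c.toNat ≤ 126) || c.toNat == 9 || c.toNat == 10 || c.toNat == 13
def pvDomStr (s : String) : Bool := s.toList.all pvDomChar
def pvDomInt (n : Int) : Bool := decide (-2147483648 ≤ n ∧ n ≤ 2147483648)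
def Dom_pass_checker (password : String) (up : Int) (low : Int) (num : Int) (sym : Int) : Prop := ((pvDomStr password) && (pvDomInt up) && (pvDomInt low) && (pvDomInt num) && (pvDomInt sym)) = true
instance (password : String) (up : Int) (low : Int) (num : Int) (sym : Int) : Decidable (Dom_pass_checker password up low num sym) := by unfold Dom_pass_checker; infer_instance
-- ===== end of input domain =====

-- B replaces A's per-character if/elif classification by a frequency dictionary plus
-- sums over the four constant alphabets (alternative decomposition, same result).

def uppersChars : List Char := "ABCDEFGHIJKLMNOPQRSTUVWXYZ".toList
def lowersChars : List Char := "abcdefghijklmnopqrstuvwxyz".toList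
def numsChars : List Char := "0123456789".toList
def symbsChars : List Char := "!\"#$%&'()*+,-./:;<=>?@[\\]^_`{|}~".toList

-- ===== PORT A =====
def pass_checker (password : String) (up : Int) (low : Int) (num : Int) (sym : Int) : List Int :=
  let r := password.toList.foldl (fun (acc : Int × Int × Int × Int) item =>
    if item ∈ uppersChars then (acc.1 + 1, acc.2.1, acc.2.2.1, acc.2.2.2)
    else if item ∈ lowersChars then (acc.1, acc.2.1 + 1, acc.2.2.1, acc.2.2.2)
    else if item ∈ numsChars then (acc.1, acc.2.1, acc.2.2.1 + 1, acc.2.2.2)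
    else if item ∈ symbsChars then (acc.1, acc.2.1, acc.2.2.1, acc.2.2.2 + 1)
    else acc) (up, low, num, sym)
  [r.1, r.2.1, r.2.2.1, r.2.2.2]

-- ===== PORT B =====
def pass_checker_alt (password : String) (up : Int) (low : Int) (num : Int) (sym : Int) : List Int :=
  let freq := password.toList.foldl
    (fun (d : PySem.Dict Char Int) c => d.insert c (d.getD c 0 + 1)) PySem.Dict.empty
  let up' := up + (uppersChars.map (fun c => freq.getD c 0)).sum
  let low' := low + (lowersChars.map (fun c => freq.getD c 0)).sum
  let num' := num + (numsChars.map (fun c => freq.getD c 0)).sum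
  let sym' := sym + (symbsChars.map (fun c => freq.getD c 0)).sum
  [up', low', num', sym']

-- ===== PRECONDITION & SPEC =====
def Spec_pass_checker (password : String) (up : Int) (low : Int) (num : Int) (sym : Int) (out : List Int) : Prop := out = pass_checker_alt password up low num sym
instance (password : String) (up : Int) (low : Int) (num : Int) (sym : Int) (out : List Int) : Decidable (Spec_pass_checker password up low num sym out) := by unfold Spec_pass_checker; infer_instance

-- ===== CLAIM (what is proved, stated in full; the proofs are below) =====
def Claim_equal_pass_checker : Prop := ∀ (password : String) (up : Int) (low : Int) (num : Int) (sym : Int), Dom_pass_checker password up low num sym → Spec_pass_checker password up low num sym (pass_checker password up low num sym)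

-- ===== LEMMAS AND PROOFS =====

-- counting a disjoint cons: countP over membership in c :: cs splits off count c
lemma countP_cons_mem (l : List Char) (c : Char) (cs : List Char) (hc : c ∉ cs) :
    l.countP (fun x => decide (x ∈ c :: cs)) = l.count c + l.countP (fun x => decide (x ∈ cs)) := by
  induction l with
  | nil => simp
  | cons x l ih =>
    simp only [List.countP_cons, List.count_cons, ih]
    by_cases hxc : x = c
    · subst hxc
      have : x ∉ cs := hc
      simp [this]
      omega
    · by_cases hxcs : x ∈ cs <;> simp [hxc, hxcs]
      omega

-- B's alphabet sums reduce to countP of membership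
lemma sum_count_eq_countP (cs l : List Char) (hnd : cs.Nodup) :
    (cs.map (fun c => (l.count c : Int))).sum = (l.countP (fun x => decide (x ∈ cs)) : Int) := by
  induction cs with
  | nil => simp
  | cons c cs ih =>
    have hc : c ∉ cs := (List.nodup_cons.mp hnd).1
    have hnd' : cs.Nodup := (List.nodup_cons.mp hnd).2
    simp only [List.map_cons, List.sum_cons, ih hnd', countP_cons_mem l c cs hc]
    push_cast
    ring

lemma low_not_up : ∀ c ∈ lowersChars, c ∉ uppersChars := by
  have h : lowersChars.all (fun c => decide (c ∉ uppersChars)) = true := by rfl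
  simpa [List.all_eq_true] using h
lemma num_not_up : ∀ c ∈ numsChars, c ∉ uppersChars := by
  have h : numsChars.all (fun c => decide (c ∉ uppersChars)) = true := by rfl
  simpa [List.all_eq_true] using h
lemma num_not_low : ∀ c ∈ numsChars, c ∉ lowersChars := by
  have h : numsChars.all (fun c => decide (c ∉ lowersChars)) = true := by rfl
  simpa [List.all_eq_true] using h
lemma sym_not_up : ∀ c ∈ symbsChars, c ∉ uppersChars := by
  have h : symbsChars.all (fun c => decide (c ∉ uppersChars)) = true := by rfl
  simpa [List.all_eq_true] using h
lemma sym_not_low : ∀ c ∈ symbsChars, c ∉ lowersChars := by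
  have h : symbsChars.all (fun c => decide (c ∉ lowersChars)) = true := by rfl
  simpa [List.all_eq_true] using h
lemma sym_not_num : ∀ c ∈ symbsChars, c ∉ numsChars := by
  have h : symbsChars.all (fun c => decide (c ∉ numsChars)) = true := by rfl
  simpa [List.all_eq_true] using h

-- A's elif-guarded predicates coincide with plain membership, by disjointness
lemma predL (x : Char) : (!decide (x ∈ uppersChars) && decide (x ∈ lowersChars))
    = decide (x ∈ lowersChars) := by
  by_cases h : x ∈ lowersChars
  · simp [h, low_not_up x h]
  · simp [h]

lemma predN (x : Char) : (!decide (x ∈ uppersChars) && (!decide (x ∈ lowersChars) && decide (x ∈ numsChars)))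
    = decide (x ∈ numsChars) := by
  by_cases h : x ∈ numsChars
  · simp [h, num_not_up x h, num_not_low x h]
  · simp [h]

lemma predS (x : Char) : (!decide (x ∈ uppersChars) && (!decide (x ∈ lowersChars) && (!decide (x ∈ numsChars) && decide (x ∈ symbsChars))))
    = decide (x ∈ symbsChars) := by
  by_cases h : x ∈ symbsChars
  · simp [h, sym_not_up x h, sym_not_low x h, sym_not_num x h]
  · simp [h]

-- A's fold computes the four elif-guarded counts added to the accumulators
lemma foldA_eq (l : List Char) : ∀ (up low num sym : Int),
    l.foldl (fun (acc : Int × Int × Int × Int) item =>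
      if item ∈ uppersChars then (acc.1 + 1, acc.2.1, acc.2.2.1, acc.2.2.2)
      else if item ∈ lowersChars then (acc.1, acc.2.1 + 1, acc.2.2.1, acc.2.2.2)
      else if item ∈ numsChars then (acc.1, acc.2.1, acc.2.2.1 + 1, acc.2.2.2)
      else if item ∈ symbsChars then (acc.1, acc.2.1, acc.2.2.1, acc.2.2.2 + 1)
      else acc) (up, low, num, sym)
    = (up + l.countP (fun x => decide (x ∈ uppersChars)),
       low + l.countP (fun x => !decide (x ∈ uppersChars) && decide (x ∈ lowersChars)),
       num + l.countP (fun x => !decide (x ∈ uppersChars) && (!decide (x ∈ lowersChars) && decide (x ∈ numsChars))),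
       sym + l.countP (fun x => !decide (x ∈ uppersChars) && (!decide (x ∈ lowersChars) && (!decide (x ∈ numsChars) && decide (x ∈ symbsChars))))) := by
  induction l with
  | nil => simp
  | cons c l ih =>
    intro up low num sym
    simp only [List.foldl_cons, List.countP_cons]
    by_cases h1 : c ∈ uppersChars
    · simp [h1, ih]; ring
    · by_cases h2 : c ∈ lowersChars
      · simp [h1, h2, ih]; ring
      · by_cases h3 : c ∈ numsChars
        · simp [h1, h2, h3, ih]; ring
        · by_cases h4 : c ∈ symbsChars
          · simp [h1, h2, h3, h4, ih]; ring
          · simp [h1, h2, h3, h4, ih]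

-- ===== VERDICT (by name: the statement is the Claim_ definition above) =====
theorem pass_checker_spec : Claim_equal_pass_checker := by
  intro password up low num sym _
  unfold Spec_pass_checker pass_checker pass_checker_alt
  simp only [foldA_eq, PySem.Dict.getD_foldl_insert_add_one, PySem.Dict.getD_empty, zero_add,
    sum_count_eq_countP _ _ (by decide : uppersChars.Nodup),
    sum_count_eq_countP _ _ (by decide : lowersChars.Nodup),
    sum_count_eq_countP _ _ (by decide : numsChars.Nodup),
    sum_count_eq_countP _ _ (by decide : symbsChars.Nodup)]
  simp only [funext predL, funext predN, funext predS]
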